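-- pv_equiv track=rewrite | github.com/mmcclatchy/respec-ai | src/cli/commands/fetch_models.py | _rank_models
-- ===== SOURCE A (Python) =====
-- _REASONING_SIGNALS = {'aime', 'math', 'swe-bench', 'swe_bench', 'gpqa', 'reasoning', 'competition', 'olympiad'}
--
-- _INSTRUCTION_SIGNALS = {'ifeval', 'mt-bench', 'mtbench', 'instruction follow', 'instruction-follow', 'task execution'}
--
-- _SPEED_SIGNALS = {'tok/s', 'tokens/s', 'latency', 'throughput', 'fast', 'efficient', 'lightweight'}
--
-- def _score_model(model_id: str, results: list[dict[str, str]]) -> tuple[int, int, int]: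
--     text = ' '.join((r['title'] + ' ' + r['snippet']).lower() for r in results)
--     reasoning = sum(1 for s in _REASONING_SIGNALS if s in text)
--     instruction = sum(1 for s in _INSTRUCTION_SIGNALS if s in text)
--     speed = sum(1 for s in _SPEED_SIGNALS if s in text)
--     return reasoning, instruction, speed
--
-- def _rank_models(models: list[str], evidence: dict[str, list[dict[str, str]]]) -> dict[str, str]:
--     if not evidence:
--         tiers = ['opus', 'sonnet', 'haiku']
--         return {tier: models[i] for i, tier in enumerate(tiers) if i < len(models)}
--
--     scored = [(m, _score_model(m, evidence.get(m, []))) for m in models]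
--     by_reasoning = sorted(scored, key=lambda x: x[1][0], reverse=True)
--     by_instruction = sorted(scored, key=lambda x: x[1][1], reverse=True)
--     by_speed = sorted(scored, key=lambda x: x[1][2], reverse=True)
--
--     opus = by_reasoning[0][0]
--     remaining = [m for m, _ in by_instruction if m != opus]
--     sonnet = remaining[0] if remaining else (by_instruction[1][0] if len(by_instruction) > 1 else models[1])
--     haiku_candidates = [m for m in (m for m, _ in by_speed) if m not in (opus, sonnet)]
--     haiku = haiku_candidates[0] if haiku_candidates else None
--
--     result: dict[str, str] = {'opus': opus, 'sonnet': sonnet}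
--     if haiku:
--         result['haiku'] = haiku
--     return result
-- ===== SOURCE B (Python) =====
-- _REASONING_SIGNALS = {'aime', 'math', 'swe-bench', 'swe_bench', 'gpqa', 'reasoning', 'competition', 'olympiad'}
--
-- _INSTRUCTION_SIGNALS = {'ifeval', 'mt-bench', 'mtbench', 'instruction follow', 'instruction-follow', 'task execution'}
--
-- _SPEED_SIGNALS = {'tok/s', 'tokens/s', 'latency', 'throughput', 'fast', 'efficient', 'lightweight'}
--
-- def _score_model(model_id: str, results: list[dict[str, str]]) -> tuple[int, int, int]:
--     text = ' '.join((r['title'] + ' ' + r['snippet']).lower() for r in results)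
--     reasoning = sum(1 for s in _REASONING_SIGNALS if s in text)
--     instruction = sum(1 for s in _INSTRUCTION_SIGNALS if s in text)
--     speed = sum(1 for s in _SPEED_SIGNALS if s in text)
--     return reasoning, instruction, speed
--
-- def _rank_models(models: list[str], evidence: dict[str, list[dict[str, str]]]) -> dict[str, str]:
--     if not evidence:
--         return dict(zip(('opus', 'sonnet', 'haiku'), models))
--
--     scored = [(m, _score_model(m, evidence.get(m, []))) for m in models]
--     opus = max(scored, key=lambda x: x[1][0])[0]
--     rem = [s for s in scored if s[0] != opus]
--     sonnet = max(rem, key=lambda x: x[1][1])[0] if rem else models[1]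
--     third = [s for s in scored if s[0] not in (opus, sonnet)]
--
--     result = {'opus': opus, 'sonnet': sonnet}
--     if third:
--         haiku = max(third, key=lambda x: x[1][2])[0]
--         if haiku:
--             result['haiku'] = haiku
--     return result
-- ===== Notes on version B (the rewrite author's own statement) =====
-- stated objective: simpler
-- what changed: Replaces A's three full stable sorts (and sorted-list filtering) by three direct first-maximum selections with max(), and the enumerate-based dict comprehension for the empty-evidence case by dict(zip(...)).
import Mathlib
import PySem

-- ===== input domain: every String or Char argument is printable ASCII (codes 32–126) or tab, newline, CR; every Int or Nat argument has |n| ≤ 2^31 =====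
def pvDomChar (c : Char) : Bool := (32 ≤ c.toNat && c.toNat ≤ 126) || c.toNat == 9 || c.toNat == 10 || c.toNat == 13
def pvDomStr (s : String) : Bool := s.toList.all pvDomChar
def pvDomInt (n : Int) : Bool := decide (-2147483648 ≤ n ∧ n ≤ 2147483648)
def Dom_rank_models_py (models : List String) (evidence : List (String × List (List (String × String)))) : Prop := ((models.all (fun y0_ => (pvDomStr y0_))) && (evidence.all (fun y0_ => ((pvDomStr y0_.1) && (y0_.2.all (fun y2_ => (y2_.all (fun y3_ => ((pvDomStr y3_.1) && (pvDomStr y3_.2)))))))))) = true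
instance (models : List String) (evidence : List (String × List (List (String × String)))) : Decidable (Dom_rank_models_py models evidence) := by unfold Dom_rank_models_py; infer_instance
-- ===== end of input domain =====

-- B is a simpler one-pass selection (three first-max picks) replacing A's three full stable sorts;
-- the shared helper _score_model is ported once and used verbatim by both ports.

-- ===== PORT A =====
-- shared helper: _score_model (identical in Source A and Source B)
def score_model_py (model_id : String) (results : List (List (String × String))) : Int × Int × Int :=
  let text := PySem.Str.lower (PySem.Str.join " " (results.map (fun r =>
    PySem.Str.join "" [PySem.Dict.getD (⟨r⟩ : PySem.Dict String String) "title" "", " ",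
                       PySem.Dict.getD (⟨r⟩ : PySem.Dict String String) "snippet" ""])))
  let reasoning : Int := Int.ofNat (List.countP (fun s => PySem.Str.isIn s text)
    ["aime", "math", "swe-bench", "swe_bench", "gpqa", "reasoning", "competition", "olympiad"])
  let instruction : Int := Int.ofNat (List.countP (fun s => PySem.Str.isIn s text)
    ["ifeval", "mt-bench", "mtbench", "instruction follow", "instruction-follow", "task execution"])
  let speed : Int := Int.ofNat (List.countP (fun s => PySem.Str.isIn s text)
    ["tok/s", "tokens/s", "latency", "throughput", "fast", "efficient", "lightweight"])
  (reasoning, instruction, speed)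

def rank_models_py (models : List String) (evidence : List (String × List (List (String × String)))) : List (String × String) :=
  if evidence = [] then
    -- {tier: models[i] for i, tier in enumerate(tiers) if i < len(models)} ; tier keys are distinct, so the dict is the plain pair list
    (List.zipIdx ["opus", "sonnet", "haiku"]).foldl (fun d (p : String × Nat) =>
      if (p.2 : Int) < (models.length : Int) then d ++ [(p.1, PySem.List.pyGetD models (p.2 : Int) "")] else d) []
  else
    let scored := models.map (fun m => (m, score_model_py m (PySem.Dict.getD (⟨evidence⟩ : PySem.Dict String (List (List (String × String)))) m [])))
    let by_reasoning := PySem.List.sorted scored (fun x => x.2.1) true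
    let by_instruction := PySem.List.sorted scored (fun x => x.2.2.1) true
    let by_speed := PySem.List.sorted scored (fun x => x.2.2.2) true
    match by_reasoning with
    | [] => []   -- by_reasoning[0] raises IndexError: excluded by Pre_
    | b0 :: _ =>
      let opus := b0.1
      let remaining := (by_instruction.map Prod.fst).filter (fun m => m != opus)
      let sonnet := match remaining with
        | s :: _ => s
        | [] => if 1 < by_instruction.length then (PySem.List.pyGetD by_instruction 1 ("", (0, 0, 0))).1
                else PySem.List.pyGetD models 1 ""    -- models[1]: raises when models has < 2 entries, excluded by Pre_
      let haiku_candidates := (by_speed.map Prod.fst).filter (fun m => !(m == opus || m == sonnet))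
      match haiku_candidates.head? with
      | none => [("opus", opus), ("sonnet", sonnet)]     -- haiku is None
      | some h => if h = "" then [("opus", opus), ("sonnet", sonnet)]   -- 'if haiku:' — empty string is falsy
                  else [("opus", opus), ("sonnet", sonnet), ("haiku", h)]

-- ===== PORT B =====
def rank_models_py_alt (models : List String) (evidence : List (String × List (List (String × String)))) : List (String × String) :=
  if evidence = [] then
    List.zip ["opus", "sonnet", "haiku"] models     -- dict(zip(('opus','sonnet','haiku'), models))
  else
    let scored := models.map (fun m => (m, score_model_py m (PySem.Dict.getD (⟨evidence⟩ : PySem.Dict String (List (List (String × String)))) m [])))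
    match PySem.List.max? scored (fun x => x.2.1) with
    | none => []    -- max() on empty: raises, excluded by Pre_
    | some o =>
      let opus := o.1
      let rem := scored.filter (fun x => x.1 != opus)
      let sonnet := match PySem.List.max? rem (fun x => x.2.2.1) with
        | some s => s.1
        | none => PySem.List.pyGetD models 1 ""
      let third := scored.filter (fun x => !(x.1 == opus || x.1 == sonnet))
      let base := [("opus", opus), ("sonnet", sonnet)]
      match PySem.List.max? third (fun x => x.2.2.2) with
      | none => base
      | some h => if h.1 = "" then base else base ++ [("haiku", h.1)]

-- ===== PRECONDITION & SPEC =====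
-- Pre_ excludes exactly the inputs where A raises: IndexError from models[1]/by_reasoning[0]
-- (nonempty evidence with fewer than 2 models) and KeyError from r['title']/r['snippet']
-- (a consulted evidence record missing the 'title' or 'snippet' key).
def Pre_rank_models_py (models : List String) (evidence : List (String × List (List (String × String)))) : Prop :=
  (evidence = [] ∨ 2 ≤ models.length) ∧
  (∀ m ∈ models, ∀ r ∈ PySem.Dict.getD (⟨evidence⟩ : PySem.Dict String (List (List (String × String)))) m [],
    (PySem.Dict.get? (⟨r⟩ : PySem.Dict String String) "title").isSome ∧
    (PySem.Dict.get? (⟨r⟩ : PySem.Dict String String) "snippet").isSome)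
instance (models : List String) (evidence : List (String × List (List (String × String)))) : Decidable (Pre_rank_models_py models evidence) := by unfold Pre_rank_models_py; infer_instance

def pvWitness_rank_models_py : List String × (List (String × List (List (String × String)))) :=
  (["m1", "m2"], [("m1", [[("title", "aime results"), ("snippet", "fast")]])])

def Spec_rank_models_py (models : List String) (evidence : List (String × List (List (String × String)))) (out : List (String × String)) : Prop := out = rank_models_py_alt models evidence
instance (models : List String) (evidence : List (String × List (List (String × String)))) (out : List (String × String)) : Decidable (Spec_rank_models_py models evidence out) := by unfold Spec_rank_models_py; infer_instance

-- ===== CLAIM (what is proved, stated in full; the proofs are below) =====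
def Claim_equal_rank_models_py : Prop := ∀ (models : List String) (evidence : List (String × List (List (String × String)))), Dom_rank_models_py models evidence → Pre_rank_models_py models evidence → Spec_rank_models_py models evidence (rank_models_py models evidence)

-- ===== LEMMAS AND PROOFS =====

-- the empty-evidence branch: A's guarded enumerate-fold equals dict(zip(tiers, models))
lemma pv_empty_branch (models : List String) :
    (List.zipIdx ["opus", "sonnet", "haiku"]).foldl (fun d (p : String × Nat) =>
      if (p.2 : Int) < (models.length : Int) then d ++ [(p.1, PySem.List.pyGetD models (p.2 : Int) "")] else d) []
    = List.zip ["opus", "sonnet", "haiku"] models := by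
  match models with
  | [] => rfl
  | [a] => rfl
  | [a, b] => rfl
  | a :: b :: c :: rest =>
    have g0 : PySem.List.pyGetD (a::b::c::rest) (0 : Int) "" = a := by
      rw [PySem.List.pyGetD_eq_getElem _ _ (by omega) (by simp only [List.length_cons]; push_cast; omega)]
      rfl
    have g1 : PySem.List.pyGetD (a::b::c::rest) (1 : Int) "" = b := by
      rw [PySem.List.pyGetD_eq_getElem _ _ (by omega) (by simp only [List.length_cons]; push_cast; omega)]
      rfl
    have g2 : PySem.List.pyGetD (a::b::c::rest) (2 : Int) "" = c := by
      rw [PySem.List.pyGetD_eq_getElem _ _ (by omega) (by simp only [List.length_cons]; push_cast; omega)]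
      rfl
    simp only [List.zipIdx, List.foldl_cons, List.foldl_nil]
    rw [if_pos (by simp only [List.length_cons]; push_cast; omega),
        if_pos (by simp only [List.length_cons]; push_cast; omega),
        if_pos (by simp only [List.length_cons]; push_cast; omega)]
    simp [g0, g1, g2]

-- unfolding equation for insertBy on a cons
lemma pv_insertBy_cons {α : Type} (bef : α → α → Bool) (x y : α) (ys : List α) :
    PySem.List.insertBy bef x (y :: ys) = if bef x y then x :: y :: ys else y :: PySem.List.insertBy bef x ys := rfl

-- descending-pairwise is preserved by insertBy
lemma pv_insertBy_pairwise {α κ : Type} [LinearOrder κ] (key : α → κ) (x : α) (acc : List α)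
    (h : acc.Pairwise (fun a b => key b ≤ key a)) :
    (PySem.List.insertBy (fun a b => decide (key b < key a)) x acc).Pairwise (fun a b => key b ≤ key a) := by
  induction acc with
  | nil => simp [PySem.List.insertBy]
  | cons y ys ih =>
    rw [List.pairwise_cons] at h
    rw [pv_insertBy_cons]
    by_cases hxy : key y < key x
    · simp only [hxy, decide_true, if_true]
      refine List.pairwise_cons.mpr ⟨?_, List.pairwise_cons.mpr h⟩
      intro z hz
      rcases List.mem_cons.mp hz with rfl | hz
      · exact le_of_lt hxy
      · exact le_trans (h.1 z hz) (le_of_lt hxy)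
    · simp only [hxy, decide_false, Bool.false_eq_true, if_false]
      refine List.pairwise_cons.mpr ⟨?_, ih h.2⟩
      intro z hz
      rcases (PySem.List.mem_insertBy _ x z ys).mp hz with rfl | hz
      · exact le_of_not_gt hxy
      · exact h.1 z hz

-- filter commutes with a single insertion into a descending list
lemma pv_filter_insertBy {α κ : Type} [LinearOrder κ] (key : α → κ) (p : α → Bool) (x : α) (acc : List α)
    (h : acc.Pairwise (fun a b => key b ≤ key a)) :
    (PySem.List.insertBy (fun a b => decide (key b < key a)) x acc).filter p
      = if p x then PySem.List.insertBy (fun a b => decide (key b < key a)) x (acc.filter p) else acc.filter p := by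
  induction acc with
  | nil => cases hpx : p x <;> simp [PySem.List.insertBy, hpx]
  | cons y ys ih =>
    rw [List.pairwise_cons] at h
    rw [pv_insertBy_cons]
    by_cases hxy : key y < key x
    · simp only [hxy, decide_true, if_true]
      cases hpx : p x with
      | false => simp [List.filter_cons, hpx]
      | true =>
        rw [List.filter_cons_of_pos hpx, if_pos rfl]
        cases hfy : List.filter p (y :: ys) with
        | nil => simp [PySem.List.insertBy]
        | cons z zs =>
          have hz' : z ∈ List.filter p (y :: ys) := by rw [hfy]; exact List.mem_cons_self
          have hzmem : z ∈ y :: ys := List.mem_of_mem_filter hz'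
          have hzx : key z < key x := by
            rcases List.mem_cons.mp hzmem with rfl | hz
            · exact hxy
            · exact lt_of_le_of_lt (h.1 z hz) hxy
          simp [pv_insertBy_cons, hzx]
    · simp only [hxy, decide_false, Bool.false_eq_true, if_false]
      cases hpy : p y with
      | true =>
        rw [List.filter_cons_of_pos hpy, List.filter_cons_of_pos hpy, ih h.2]
        cases hpx : p x with
        | false => simp
        | true => simp [pv_insertBy_cons, hxy]
      | false =>
        rw [List.filter_cons_of_neg (by simp [hpy]), List.filter_cons_of_neg (by simp [hpy]), ih h.2]

-- filter commutes with the whole insertion sort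
lemma pv_filter_foldl_insert {α κ : Type} [LinearOrder κ] (key : α → κ) (p : α → Bool) :
    ∀ (xs acc : List α), acc.Pairwise (fun a b => key b ≤ key a) →
      (xs.foldl (fun acc x => PySem.List.insertBy (fun a b => decide (key b < key a)) x acc) acc).filter p
        = (xs.filter p).foldl (fun acc x => PySem.List.insertBy (fun a b => decide (key b < key a)) x acc) (acc.filter p) := by
  intro xs
  induction xs with
  | nil => intro acc _; rfl
  | cons x t ih =>
    intro acc hacc
    have h1 := ih (PySem.List.insertBy (fun a b => decide (key b < key a)) x acc) (pv_insertBy_pairwise key x acc hacc)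
    rw [List.foldl_cons, h1, pv_filter_insertBy key p x acc hacc]
    cases hpx : p x with
    | true => simp [List.filter, hpx]
    | false => simp [List.filter, hpx]

lemma pv_filter_sorted_rev {α κ : Type} [LinearOrder κ] (xs : List α) (key : α → κ) (p : α → Bool) :
    (PySem.List.sorted xs key true).filter p = PySem.List.sorted (xs.filter p) key true := by
  rw [PySem.List.sorted_rev_eq_foldl_insertBy, PySem.List.sorted_rev_eq_foldl_insertBy]
  exact pv_filter_foldl_insert key p xs [] (by simp)

-- the head of the insertion fold is the running first-max
lemma pv_head_foldl_insert {α κ : Type} [LinearOrder κ] (key : α → κ) :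
    ∀ (xs acc : List α),
      (xs.foldl (fun acc x => PySem.List.insertBy (fun a b => decide (key b < key a)) x acc) acc).head?
        = xs.foldl (fun a x => match a with
            | none => some x
            | some m => if key m < key x then some x else some m) acc.head? := by
  intro xs
  induction xs with
  | nil => intro acc; rfl
  | cons x t ih =>
    intro acc
    rw [List.foldl_cons, ih, List.foldl_cons]
    congr 1
    cases acc with
    | nil => rfl
    | cons y ys =>
      by_cases hxy : key y < key x
      · simp [PySem.List.insertBy, hxy]
      · simp [PySem.List.insertBy, hxy]

-- head of the stable descending sort = Python max (first maximal element)
lemma pv_head_sorted_rev {α κ : Type} [LinearOrder κ] (ys : List α) (key : α → κ) :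
    (PySem.List.sorted ys key true).head? = PySem.List.max? ys key := by
  rw [PySem.List.sorted_rev_eq_foldl_insertBy, pv_head_foldl_insert key ys [], PySem.List.max?]
  apply PySem.List.foldl_congr_mem
  intro a x _
  cases a <;> rfl

-- first element of A's sorted-then-mapped-then-filtered list = B's max over the filtered scores
lemma pv_first_candidate {α κ : Type} [LinearOrder κ] (xs : List (String × α)) (key : String × α → κ) (q : String → Bool) :
    (((PySem.List.sorted xs key true).map Prod.fst).filter q).head?
      = Option.map Prod.fst (PySem.List.max? (xs.filter (fun x => q x.1)) key) := by
  rw [List.filter_map, List.head?_map]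
  have : (PySem.List.sorted xs key true).filter (q ∘ Prod.fst) = PySem.List.sorted (xs.filter (fun x => q x.1)) key true := by
    rw [pv_filter_sorted_rev]; rfl
  rw [this, pv_head_sorted_rev]

-- the haiku selection agrees once opus and sonnet agree
lemma pv_haiku_tail (scored : List (String × (Int × Int × Int))) (opus sonnet : String) :
    (match (((PySem.List.sorted scored (fun x => x.2.2.2) true).map Prod.fst).filter (fun m => !(m == opus || m == sonnet))).head? with
     | none => [("opus", opus), ("sonnet", sonnet)]
     | some h => if h = "" then [("opus", opus), ("sonnet", sonnet)]
                 else [("opus", opus), ("sonnet", sonnet), ("haiku", h)])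
    = (match PySem.List.max? (scored.filter (fun x => !(x.1 == opus || x.1 == sonnet))) (fun x => x.2.2.2) with
       | none => [("opus", opus), ("sonnet", sonnet)]
       | some h => if h.1 = "" then [("opus", opus), ("sonnet", sonnet)]
                   else [("opus", opus), ("sonnet", sonnet)] ++ [("haiku", h.1)]) := by
  have h3 := pv_first_candidate scored (fun x => x.2.2.2) (fun m => !(m == opus || m == sonnet))
  cases hm : PySem.List.max? (scored.filter (fun x => !(x.1 == opus || x.1 == sonnet))) (fun x => x.2.2.2) with
  | none => rw [hm] at h3; rw [h3]; rfl
  | some h =>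
    rw [hm] at h3
    simp only [Option.map_some] at h3
    rw [h3]
    by_cases hhe : h.1 = "" <;> simp [hhe]

-- ===== VERDICT (by name: the statement is the Claim_ definition above) =====
theorem rank_models_py_spec : Claim_equal_rank_models_py := by
  intro models evidence _ hpre
  unfold Spec_rank_models_py rank_models_py rank_models_py_alt
  by_cases hev : evidence = []
  · rw [if_pos hev, if_pos hev]
    exact pv_empty_branch models
  · rw [if_neg hev, if_neg hev]
    have hlen : 2 ≤ models.length := hpre.1.resolve_left hev
    dsimp only
    set scored := models.map (fun m => (m, score_model_py m (PySem.Dict.getD (⟨evidence⟩ : PySem.Dict String (List (List (String × String)))) m []))) with hscored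
    have hslen : scored.length = models.length := by rw [hscored, List.length_map]
    have h1 := pv_head_sorted_rev scored (fun x => x.2.1)
    cases hs1 : PySem.List.sorted scored (fun x => x.2.1) true with
    | nil =>
      exfalso
      have : scored = [] := (PySem.List.sorted_eq_nil_iff scored (fun x => x.2.1) true).mp hs1
      rw [this] at hslen; simp only [List.length_nil] at hslen; omega
    | cons b0 t0 =>
      have hmax1 : PySem.List.max? scored (fun x => x.2.1) = some b0 := by
        rw [← h1, hs1]; rfl
      rw [hmax1]
      dsimp only
      -- sonnet
      have h2 := pv_first_candidate scored (fun x => x.2.2.1) (fun m => m != b0.1)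
      cases hr : PySem.List.max? (scored.filter (fun x => x.1 != b0.1)) (fun x => x.2.2.1) with
      | some s =>
        rw [hr] at h2
        simp only [Option.map_some] at h2
        obtain ⟨t, ht⟩ : ∃ t, (List.filter (fun m => m != b0.1) (List.map Prod.fst (PySem.List.sorted scored (fun x => x.2.2.1) true))) = s.1 :: t := by
          cases hrem : List.filter (fun m => m != b0.1) (List.map Prod.fst (PySem.List.sorted scored (fun x => x.2.2.1) true)) with
          | nil => rw [hrem] at h2; simp at h2
          | cons z zs =>
            rw [hrem] at h2
            simp only [List.head?_cons, Option.some.injEq] at h2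
            exact ⟨zs, by rw [h2]⟩
        rw [ht]
        dsimp only
        exact pv_haiku_tail scored b0.1 s.1
      | none =>
        rw [hr] at h2
        simp only [Option.map_none] at h2
        have hremnil : (List.filter (fun m => m != b0.1) (List.map Prod.fst (PySem.List.sorted scored (fun x => x.2.2.1) true))) = [] :=
          List.head?_eq_none_iff.mp h2
        have hfilnil : scored.filter (fun x => x.1 != b0.1) = [] :=
          (PySem.List.max?_eq_none_iff _ _).mp hr
        have hall : ∀ x ∈ scored, x.1 = b0.1 := by
          intro x hx
          have := List.filter_eq_nil_iff.mp hfilnil x hx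
          simpa using this
        have hlen2 : 1 < (PySem.List.sorted scored (fun x => x.2.2.1) true).length := by
          rw [PySem.List.length_sorted, hslen]; omega
        have hA : (PySem.List.pyGetD (PySem.List.sorted scored (fun x => x.2.2.1) true) 1 ("", (0, 0, 0))).1 = b0.1 := by
          rw [PySem.List.pyGetD_eq_getElem _ _ (by omega) (by exact_mod_cast hlen2)]
          exact hall _ ((PySem.List.mem_sorted _ _ _ _).mp (List.getElem_mem _))
        have hB : PySem.List.pyGetD models 1 "" = b0.1 := by
          have hm1 : 1 < models.length := by omega
          rw [PySem.List.pyGetD_eq_getElem _ _ (by omega) (by exact_mod_cast hm1)]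
          have hmem : models[(1:Int).toNat] ∈ models := List.getElem_mem _
          have : (models[(1:Int).toNat], score_model_py models[(1:Int).toNat] (PySem.Dict.getD (⟨evidence⟩ : PySem.Dict String (List (List (String × String)))) models[(1:Int).toNat] [])) ∈ scored := by
            rw [hscored]; exact List.mem_map_of_mem hmem
          exact hall _ this
        rw [hremnil]
        dsimp only
        rw [if_pos hlen2, hA, hB]
        exact pv_haiku_tail scored b0.1 b0.1
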